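-- pv_equiv track=rewrite | github.com/Wulfic/Cicada3301 | LiberPrimus/tools/vigenere_word_attack.py | text_to_indices
-- ===== SOURCE A (Python) =====
-- LETTER_TO_INDEX = {
--     'F': 0, 'U': 1, 'TH': 2, 'O': 3, 'R': 4, 'C': 5, 'K': 5, 'G': 6,
--     'W': 7, 'H': 8, 'N': 9, 'I': 10, 'J': 11, 'EO': 12, 'P': 13,
--     'X': 14, 'S': 15, 'T': 16, 'B': 17, 'E': 18, 'M': 19, 'L': 20,
--     'NG': 21, 'OE': 22, 'D': 23, 'A': 24, 'AE': 25, 'Y': 26,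
--     'IA': 27, 'IO': 27, 'EA': 28, 'V': 1, 'Q': 5, 'Z': 15
-- }
--
-- def text_to_indices(text):
--     """Convert English text to Gematria Primus indices"""
--     text = text.upper()
--     indices = []
--     i = 0
--     while i < len(text):
--         if i < len(text) - 1:
--             digraph = text[i:i+2]
--             if digraph in LETTER_TO_INDEX:
--                 indices.append(LETTER_TO_INDEX[digraph])
--                 i += 2
--                 continue
--         if text[i] in LETTER_TO_INDEX:
--             indices.append(LETTER_TO_INDEX[text[i]])
--         i += 1
--     return indices
-- ===== SOURCE B (Python) =====
-- # B: streaming two-state automaton (carried "pending" character, no lookahead):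
-- # A scans by index with slicing and a two-character lookahead into one flat dict;
-- # B instead folds over the characters one at a time, carrying at most one pending
-- # digraph-starting character, and emits from three small tables (digraph pairs,
-- # single letters, digraph starters), flushing the pending letter at the end.
--
-- _DIGRAPH = {('T', 'H'): 2, ('E', 'O'): 12, ('N', 'G'): 21, ('O', 'E'): 22,
--             ('A', 'E'): 25, ('I', 'A'): 27, ('I', 'O'): 27, ('E', 'A'): 28}
-- _SINGLE = {'F': 0, 'U': 1, 'O': 3, 'R': 4, 'C': 5, 'K': 5, 'G': 6, 'W': 7,
--            'H': 8, 'N': 9, 'I': 10, 'J': 11, 'P': 13, 'X': 14, 'S': 15,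
--            'T': 16, 'B': 17, 'E': 18, 'M': 19, 'L': 20, 'D': 23, 'A': 24,
--            'Y': 26, 'V': 1, 'Q': 5, 'Z': 15}
-- _STARTS = {'T', 'E', 'N', 'O', 'A', 'I'}  # first characters of digraphs
--
-- def text_to_indices(text):
--     """Convert English text to Gematria Primus indices"""
--     out = []
--     pending = None
--     for c in text.upper():
--         if pending is not None and (pending, c) in _DIGRAPH:
--             out.append(_DIGRAPH[(pending, c)])
--             pending = None
--             continue
--         if pending is not None:
--             out.append(_SINGLE[pending])  # pending is always in _STARTS <= _SINGLE
--             pending = None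
--         if c in _STARTS:
--             pending = c
--         elif c in _SINGLE:
--             out.append(_SINGLE[c])
--     if pending is not None:
--         out.append(_SINGLE[pending])
--     return out
-- ===== Notes on version B (the rewrite author's own statement) =====
-- stated objective: alternative
-- what changed: B replaces A's index-based scan with per-position slicing and two-character lookahead into one flat dict by a streaming two-state automaton: a single fold over the characters carrying at most one pending digraph-starting letter, emitting from separate digraph/single-letter tables and flushing the pending letter at the end.
import Mathlib
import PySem

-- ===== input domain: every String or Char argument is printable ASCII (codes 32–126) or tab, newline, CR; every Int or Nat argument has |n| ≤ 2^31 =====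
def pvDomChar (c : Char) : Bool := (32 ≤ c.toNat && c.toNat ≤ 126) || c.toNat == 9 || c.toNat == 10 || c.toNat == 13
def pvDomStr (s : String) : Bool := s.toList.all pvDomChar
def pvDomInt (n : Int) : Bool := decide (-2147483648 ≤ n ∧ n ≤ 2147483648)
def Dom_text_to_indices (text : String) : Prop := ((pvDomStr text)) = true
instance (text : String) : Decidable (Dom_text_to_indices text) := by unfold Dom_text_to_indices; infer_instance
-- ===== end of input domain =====

-- B replaces A's index-based lookahead scan (slices + one flat dict) by a streaming
-- automaton: one fold over the characters carrying a pending digraph-start letter;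
-- objective: alternative.

-- ===== PORT A =====
-- Python dict keyed by str; ported over List Char (Python strings handled on the list side per PySem).
def LETTER_TO_INDEX : PySem.Dict (List Char) Int := PySem.Dict.ofList [
  (['F'], 0), (['U'], 1), (['T','H'], 2), (['O'], 3), (['R'], 4), (['C'], 5), (['K'], 5), (['G'], 6),
  (['W'], 7), (['H'], 8), (['N'], 9), (['I'], 10), (['J'], 11), (['E','O'], 12), (['P'], 13),
  (['X'], 14), (['S'], 15), (['T'], 16), (['B'], 17), (['E'], 18), (['M'], 19), (['L'], 20),
  (['N','G'], 21), (['O','E'], 22), (['D'], 23), (['A'], 24), (['A','E'], 25), (['Y'], 26),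
  (['I','A'], 27), (['I','O'], 27), (['E','A'], 28), (['V'], 1), (['Q'], 5), (['Z'], 15)]

-- the 'while i < len(text)' loop of A; the single-char check shared by 'continue' fall-through
def aSingleStep (t : List Char) (i : Nat) (indices : List Int) : List Int :=
  match PySem.List.pyGet? t (i : Int) with
  | some c =>
      match LETTER_TO_INDEX.get? [c] with
      | some v => indices ++ [v]
      | none => indices
  | none => indices

def aLoop (t : List Char) (i : Nat) (indices : List Int) : List Int :=
  if _h : i < t.length then
    if i < t.length - 1 then
      let digraph := PySem.List.slice t (some (i : Int)) (some ((i : Int) + 2))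
      match LETTER_TO_INDEX.get? digraph with
      | some v => aLoop t (i + 2) (indices ++ [v])
      | none => aLoop t (i + 1) (aSingleStep t i indices)
    else aLoop t (i + 1) (aSingleStep t i indices)
  else indices
termination_by t.length - i

def text_to_indices (text : String) : List Int :=
  aLoop (PySem.Chars.upper text.toList) 0 []

-- ===== PORT B =====
def DIGRAPH : PySem.Dict (Char × Char) Int := PySem.Dict.ofList [
  (('T','H'), 2), (('E','O'), 12), (('N','G'), 21), (('O','E'), 22),
  (('A','E'), 25), (('I','A'), 27), (('I','O'), 27), (('E','A'), 28)]

def SINGLE : PySem.Dict Char Int := PySem.Dict.ofList [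
  ('F', 0), ('U', 1), ('O', 3), ('R', 4), ('C', 5), ('K', 5), ('G', 6), ('W', 7),
  ('H', 8), ('N', 9), ('I', 10), ('J', 11), ('P', 13), ('X', 14), ('S', 15),
  ('T', 16), ('B', 17), ('E', 18), ('M', 19), ('L', 20), ('D', 23), ('A', 24),
  ('Y', 26), ('V', 1), ('Q', 5), ('Z', 15)]

def STARTS : List Char := ['T', 'E', 'N', 'O', 'A', 'I']  -- Python set of digraph starters

-- one iteration of B's for-loop: state = (out, pending).
-- _SINGLE[pending] in Python cannot raise (pending ∈ _STARTS ⊆ _SINGLE); ported as getD with default 0.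
def bStep (st : List Int × Option Char) (c : Char) : List Int × Option Char :=
  match st.2 with
  | some p =>
      match DIGRAPH.get? (p, c) with
      | some v => (st.1 ++ [v], none)
      | none =>
          let out := st.1 ++ [SINGLE.getD p 0]
          if STARTS.contains c then (out, some c)
          else match SINGLE.get? c with
            | some v => (out ++ [v], none)
            | none => (out, none)
  | none =>
      if STARTS.contains c then (st.1, some c)
      else match SINGLE.get? c with
        | some v => (st.1 ++ [v], none)
        | none => (st.1, none)

def text_to_indices_alt (text : String) : List Int :=
  let fin := (PySem.Chars.upper text.toList).foldl bStep ([], none)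
  match fin.2 with
  | some p => fin.1 ++ [SINGLE.getD p 0]   -- final flush of the pending letter
  | none => fin.1

-- ===== PRECONDITION & SPEC =====
def Spec_text_to_indices (text : String) (out : List Int) : Prop := out = text_to_indices_alt text
instance (text : String) (out : List Int) : Decidable (Spec_text_to_indices text out) := by unfold Spec_text_to_indices; infer_instance

-- ===== CLAIM =====
def Claim_equal_text_to_indices : Prop := ∀ (text : String), Dom_text_to_indices text → Spec_text_to_indices text (text_to_indices text)

-- ===== LEMMAS AND PROOFS =====

-- proof helper: the list B's automaton still emits from state p? on the remaining input
def bRun : Option Char → List Char → List Int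
  | none, [] => []
  | some p, [] => [SINGLE.getD p 0]
  | none, c :: rest =>
      if STARTS.contains c then bRun (some c) rest
      else match SINGLE.get? c with
        | some v => v :: bRun none rest
        | none => bRun none rest
  | some p, c :: rest =>
      match DIGRAPH.get? (p, c) with
      | some v => v :: bRun none rest
      | none => SINGLE.getD p 0 :: bRun none (c :: rest)
termination_by p? l => l.length * 2 + (if p?.isSome then 1 else 0)

def bFinalize (st : List Int × Option Char) : List Int :=
  match st.2 with
  | some p => st.1 ++ [SINGLE.getD p 0]
  | none => st.1

lemma foldl_bStep_eq_bRun (l : List Char) (acc : List Int) (p? : Option Char) :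
    bFinalize (l.foldl bStep (acc, p?)) = acc ++ bRun p? l := by
  induction l generalizing acc p? with
  | nil => cases p? <;> simp [bFinalize, bRun]
  | cons c rest ih =>
    cases p? with
    | none =>
      by_cases hs : c ∈ STARTS
      · simp [List.foldl_cons, bStep, hs, ih, bRun]
      · rcases hv : SINGLE.get? c with _ | v <;>
          simp [List.foldl_cons, bStep, hs, hv, ih, bRun]
    | some p =>
      rcases hd : DIGRAPH.get? (p, c) with _ | v
      · by_cases hs : c ∈ STARTS
        · simp [List.foldl_cons, bStep, hd, hs, ih, bRun]
        · rcases hv : SINGLE.get? c with _ | v <;>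
            simp [List.foldl_cons, bStep, hd, hs, hv, ih, bRun]
      · simp [List.foldl_cons, bStep, hd, ih, bRun]

-- single-char lookup in A's flat dict = B's single-letter table
set_option maxHeartbeats 2000000 in
lemma single_lookup (c : Char) :
    LETTER_TO_INDEX.get? [c] = SINGLE.get? c := by
  have hA : LETTER_TO_INDEX.items = [(['F'], 0), (['U'], 1), (['T','H'], 2), (['O'], 3), (['R'], 4), (['C'], 5), (['K'], 5), (['G'], 6),
    (['W'], 7), (['H'], 8), (['N'], 9), (['I'], 10), (['J'], 11), (['E','O'], 12), (['P'], 13),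
    (['X'], 14), (['S'], 15), (['T'], 16), (['B'], 17), (['E'], 18), (['M'], 19), (['L'], 20),
    (['N','G'], 21), (['O','E'], 22), (['D'], 23), (['A'], 24), (['A','E'], 25), (['Y'], 26),
    (['I','A'], 27), (['I','O'], 27), (['E','A'], 28), (['V'], 1), (['Q'], 5), (['Z'], 15)] := by rfl
  have hS : SINGLE.items = [('F', 0), ('U', 1), ('O', 3), ('R', 4), ('C', 5), ('K', 5), ('G', 6), ('W', 7),
    ('H', 8), ('N', 9), ('I', 10), ('J', 11), ('P', 13), ('X', 14), ('S', 15),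
    ('T', 16), ('B', 17), ('E', 18), ('M', 19), ('L', 20), ('D', 23), ('A', 24),
    ('Y', 26), ('V', 1), ('Q', 5), ('Z', 15)] := by rfl
  by_cases h0 : 'F' = c
  · subst h0; decide
  by_cases h1 : 'U' = c
  · subst h1; decide
  by_cases h2 : 'T' = c
  · subst h2; decide
  by_cases h3 : 'O' = c
  · subst h3; decide
  by_cases h4 : 'R' = c
  · subst h4; decide
  by_cases h5 : 'C' = c
  · subst h5; decide
  by_cases h6 : 'K' = c
  · subst h6; decide
  by_cases h7 : 'G' = c
  · subst h7; decide
  by_cases h8 : 'W' = c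
  · subst h8; decide
  by_cases h9 : 'H' = c
  · subst h9; decide
  by_cases h10 : 'N' = c
  · subst h10; decide
  by_cases h11 : 'I' = c
  · subst h11; decide
  by_cases h12 : 'J' = c
  · subst h12; decide
  by_cases h13 : 'E' = c
  · subst h13; decide
  by_cases h14 : 'P' = c
  · subst h14; decide
  by_cases h15 : 'X' = c
  · subst h15; decide
  by_cases h16 : 'S' = c
  · subst h16; decide
  by_cases h17 : 'B' = c
  · subst h17; decide
  by_cases h18 : 'M' = c
  · subst h18; decide
  by_cases h19 : 'L' = c
  · subst h19; decide
  by_cases h20 : 'D' = c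
  · subst h20; decide
  by_cases h21 : 'A' = c
  · subst h21; decide
  by_cases h22 : 'Y' = c
  · subst h22; decide
  by_cases h23 : 'V' = c
  · subst h23; decide
  by_cases h24 : 'Q' = c
  · subst h24; decide
  by_cases h25 : 'Z' = c
  · subst h25; decide
  simp_all [PySem.Dict.get?, List.find?_nil, List.cons_beq_cons]

-- two-char lookup in A's flat dict = B's digraph table
set_option maxHeartbeats 2000000 in
lemma digraph_lookup (c d : Char) :
    LETTER_TO_INDEX.get? [c, d] = DIGRAPH.get? (c, d) := by
  have hA : LETTER_TO_INDEX.items = [(['F'], 0), (['U'], 1), (['T','H'], 2), (['O'], 3), (['R'], 4), (['C'], 5), (['K'], 5), (['G'], 6),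
    (['W'], 7), (['H'], 8), (['N'], 9), (['I'], 10), (['J'], 11), (['E','O'], 12), (['P'], 13),
    (['X'], 14), (['S'], 15), (['T'], 16), (['B'], 17), (['E'], 18), (['M'], 19), (['L'], 20),
    (['N','G'], 21), (['O','E'], 22), (['D'], 23), (['A'], 24), (['A','E'], 25), (['Y'], 26),
    (['I','A'], 27), (['I','O'], 27), (['E','A'], 28), (['V'], 1), (['Q'], 5), (['Z'], 15)] := by rfl
  have hD : DIGRAPH.items = [(('T','H'), 2), (('E','O'), 12), (('N','G'), 21), (('O','E'), 22),
    (('A','E'), 25), (('I','A'), 27), (('I','O'), 27), (('E','A'), 28)] := by rfl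
  by_cases h2 : 'T' = c
  · subst h2
    by_cases g0 : 'H' = d
    · subst g0; decide
    simp_all [PySem.Dict.get?, List.find?_nil, List.cons_beq_cons, Prod.ext_iff]
  by_cases h3 : 'O' = c
  · subst h3
    by_cases g0 : 'E' = d
    · subst g0; decide
    simp_all [PySem.Dict.get?, List.find?_nil, List.cons_beq_cons, Prod.ext_iff]
  by_cases h10 : 'N' = c
  · subst h10
    by_cases g0 : 'G' = d
    · subst g0; decide
    simp_all [PySem.Dict.get?, List.find?_nil, List.cons_beq_cons, Prod.ext_iff]
  by_cases h11 : 'I' = c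
  · subst h11
    by_cases g0 : 'A' = d
    · subst g0; decide
    by_cases g1 : 'O' = d
    · subst g1; decide
    simp_all [PySem.Dict.get?, List.find?_nil, List.cons_beq_cons, Prod.ext_iff]
  by_cases h13 : 'E' = c
  · subst h13
    by_cases g0 : 'O' = d
    · subst g0; decide
    by_cases g1 : 'A' = d
    · subst g1; decide
    simp_all [PySem.Dict.get?, List.find?_nil, List.cons_beq_cons, Prod.ext_iff]
  by_cases h21 : 'A' = c
  · subst h21
    by_cases g0 : 'E' = d
    · subst g0; decide
    simp_all [PySem.Dict.get?, List.find?_nil, List.cons_beq_cons, Prod.ext_iff]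
  simp_all [PySem.Dict.get?, List.find?_nil, List.cons_beq_cons, Prod.ext_iff]

lemma starts_of_digraph {c d : Char} {v : Int} (h : DIGRAPH.get? (c, d) = some v) :
    STARTS.contains c = true := by
  have hD : DIGRAPH.items = [(('T','H'), 2), (('E','O'), 12), (('N','G'), 21), (('O','E'), 22),
    (('A','E'), 25), (('I','A'), 27), (('I','O'), 27), (('E','A'), 28)] := by rfl
  by_cases hT : 'T' = c
  · subst hT; decide
  by_cases hE : 'E' = c
  · subst hE; decide
  by_cases hN : 'N' = c
  · subst hN; decide
  by_cases hO : 'O' = c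
  · subst hO; decide
  by_cases hA : 'A' = c
  · subst hA; decide
  by_cases hI : 'I' = c
  · subst hI; decide
  exfalso
  simp_all [PySem.Dict.get?, Prod.ext_iff]

lemma single_of_starts {c : Char} (h : STARTS.contains c = true) :
    SINGLE.get? c = some (SINGLE.getD c 0) := by
  have : c = 'T' ∨ c = 'E' ∨ c = 'N' ∨ c = 'O' ∨ c = 'A' ∨ c = 'I' := by
    simpa [STARTS, List.contains_eq_mem, or_comm, or_left_comm] using h
  rcases this with h | h | h | h | h | h <;> subst h <;> decide

lemma aSingleStep_eq (t : List Char) (i : Nat) (acc : List Int) (h : i < t.length) :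
    aSingleStep t i acc = (match SINGLE.get? t[i] with
      | some v => acc ++ [v]
      | none => acc) := by
  unfold aSingleStep
  rw [PySem.List.pyGet?_natCast, List.getElem?_eq_getElem h]
  simp only [single_lookup]

-- from B's fresh state, handling one character c matches A's single-char step when
-- c cannot combine with what follows
lemma bRun_single (c : Char) (rest : List Char)
    (hnd : ∀ d rest', rest = d :: rest' → DIGRAPH.get? (c, d) = none) :
    bRun none (c :: rest) = (match SINGLE.get? c with
      | some v => [v]
      | none => []) ++ bRun none rest := by
  by_cases hs : STARTS.contains c
  · rw [bRun.eq_3]; rw [if_pos hs, single_of_starts hs]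
    cases rest with
    | nil => simp [bRun]
    | cons d rest' =>
      rw [bRun.eq_4, hnd d rest' rfl]
      simp
  · rw [bRun.eq_3, if_neg hs]
    rcases hv : SINGLE.get? c with _ | v <;> simp

set_option maxRecDepth 4096 in
lemma aLoop_eq_bRun (t : List Char) (i : Nat) (acc : List Int) :
    aLoop t i acc = acc ++ bRun none (t.drop i) := by
  fun_induction aLoop t i acc
  case case1 =>
    rename_i i indices h1 h2 dg v hx ih
    have hi1 : i + 1 < t.length := by omega
    have hd0 : List.drop i t = t[i] :: List.drop (i+1) t := List.drop_eq_getElem_cons h1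
    have hd1 : List.drop (i+1) t = t[i+1] :: List.drop (i+2) t := List.drop_eq_getElem_cons hi1
    have e1 : PySem.List.slice t (some (i:Int)) (some ((i:Int)+2)) = [t[i], t[i+1]] := by
      have hsl : PySem.List.slice t (some (i:Int)) (some ((i:Int)+2)) = (List.drop i t).take 2 := by
        simpa using PySem.List.slice_natCast_add (xs := t) (j := i) (n := 2)
      rw [hsl, hd0, hd1]; rfl
    have hx' : DIGRAPH.get? (t[i], t[i+1]) = some v := by
      rw [← digraph_lookup, ← e1]; exact hx
    have hs := starts_of_digraph hx'
    rw [ih, hd0, hd1, bRun.eq_3, if_pos hs, bRun.eq_4, hx']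
    simp
  case case2 =>
    rename_i i indices h1 h2 dg hx ih
    have hi1 : i + 1 < t.length := by omega
    have hd0 : List.drop i t = t[i] :: List.drop (i+1) t := List.drop_eq_getElem_cons h1
    have hd1 : List.drop (i+1) t = t[i+1] :: List.drop (i+2) t := List.drop_eq_getElem_cons hi1
    have e1 : PySem.List.slice t (some (i:Int)) (some ((i:Int)+2)) = [t[i], t[i+1]] := by
      have hsl : PySem.List.slice t (some (i:Int)) (some ((i:Int)+2)) = (List.drop i t).take 2 := by
        simpa using PySem.List.slice_natCast_add (xs := t) (j := i) (n := 2)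
      rw [hsl, hd0, hd1]; rfl
    have hx' : DIGRAPH.get? (t[i], t[i+1]) = none := by
      rw [← digraph_lookup, ← e1]; exact hx
    rw [ih, aSingleStep_eq t i indices h1, hd0]
    rw [bRun_single t[i] (List.drop (i+1) t) (by
      intro d rest' he
      rw [hd1] at he
      cases he
      exact hx')]
    rcases hv : SINGLE.get? t[i] with _ | v <;> simp
  case case3 =>
    rename_i i indices h1 h2 ih
    have hd0 : List.drop i t = t[i] :: List.drop (i+1) t := List.drop_eq_getElem_cons h1
    have hd1 : List.drop (i+1) t = [] := List.drop_eq_nil_of_le (by omega)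
    rw [ih, aSingleStep_eq t i indices h1, hd0, hd1]
    rw [bRun_single t[i] [] (by intro d rest' he; cases he)]
    rcases hv : SINGLE.get? t[i] with _ | v <;> simp [bRun]
  case case4 =>
    rename_i i indices h1
    have hd0 : List.drop i t = [] := List.drop_eq_nil_of_le (by omega)
    simp [hd0, bRun]

-- ===== VERDICT =====
theorem text_to_indices_spec : Claim_equal_text_to_indices := by
  intro text _
  unfold Spec_text_to_indices text_to_indices text_to_indices_alt
  have hb := foldl_bStep_eq_bRun (PySem.Chars.upper text.toList) [] none
  have ha := aLoop_eq_bRun (PySem.Chars.upper text.toList) 0 []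
  simp only [List.drop_zero, List.nil_append] at ha hb
  rw [ha, ← hb]
  rfl
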